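-- pv_equiv track=rewrite | github.com/misterbeebee/morph-endo | src/misc.py | parse_nat
-- ===== SOURCE A (Python) =====
-- def parse_nat(nat_str):
--     "Convert a non-P-terminated binary-IC string to int."
--     n = 0
--     for power in range(0, len(nat_str)):
--         h = nat_str[power]
--         if h in ['I', 'F']:
--             # 0 bit in this position
--             pass
--         elif h == 'C':
--             n += 1 << power
--     return n
-- ===== SOURCE B (Python) =====
-- def parse_nat(nat_str):
--     "Convert a non-P-terminated binary-IC string to int."
--     n = 0
--     for c in reversed(nat_str):
--         n = n * 2 + (1 if c == 'C' else 0)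
--     return n
-- ===== Notes on version B (the rewrite author's own statement) =====
-- stated objective: alternative
-- what changed: Replaces the per-index sum of independent powers of two (1 << power per position) with Horner's method: one doubling accumulator over the reversed string, no shifts or index lookups.
import Mathlib
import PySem

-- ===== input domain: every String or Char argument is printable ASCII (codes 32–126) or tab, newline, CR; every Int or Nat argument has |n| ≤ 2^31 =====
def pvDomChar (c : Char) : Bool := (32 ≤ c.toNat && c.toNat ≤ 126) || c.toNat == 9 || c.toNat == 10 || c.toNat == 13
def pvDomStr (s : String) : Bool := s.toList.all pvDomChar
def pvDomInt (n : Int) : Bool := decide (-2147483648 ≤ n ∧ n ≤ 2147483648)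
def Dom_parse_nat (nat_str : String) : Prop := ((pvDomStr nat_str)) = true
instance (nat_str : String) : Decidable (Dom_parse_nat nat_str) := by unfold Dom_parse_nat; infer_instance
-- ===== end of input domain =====

-- ===== PORT A =====
-- n starts at 0; for each index 'power', look at the char and add 1 << power when it is 'C'
def parse_nat (nat_str : String) : Int :=
  (nat_str.toList.zipIdx).foldl
    (fun n p =>
      if p.1 = 'I' ∨ p.1 = 'F' then n
      else if p.1 = 'C' then n + 2 ^ p.2
      else n) 0

-- ===== PORT B =====
-- B: Horner's method over the reversed string (MSB-first doubling accumulator)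
def parse_nat_alt (nat_str : String) : Int :=
  nat_str.toList.reverse.foldl (fun n c => n * 2 + (if c = 'C' then 1 else 0)) 0

-- ===== PRECONDITION & SPEC =====
def Spec_parse_nat (nat_str : String) (out : Int) : Prop := out = parse_nat_alt nat_str
instance (nat_str : String) (out : Int) : Decidable (Spec_parse_nat nat_str out) := by unfold Spec_parse_nat; infer_instance

-- ===== CLAIM (what is proved, stated in full; the proofs are below) =====
def Claim_equal_parse_nat : Prop := ∀ (nat_str : String), Dom_parse_nat nat_str → Spec_parse_nat nat_str (parse_nat nat_str)

-- ===== LEMMAS AND PROOFS =====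

def pvBit (c : Char) : Int := if c = 'C' then 1 else 0

def pvHorner (l : List Char) : Int :=
  l.foldr (fun c n => 2 * n + pvBit c) 0

theorem pvA_foldl (l : List Char) : ∀ (k : Nat) (a : Int),
    (l.zipIdx k).foldl
      (fun n p =>
        if p.1 = 'I' ∨ p.1 = 'F' then n
        else if p.1 = 'C' then n + 2 ^ p.2
        else n) a = a + 2 ^ k * pvHorner l := by
  induction l with
  | nil => intro k a; simp [pvHorner]
  | cons c l ih =>
      intro k a
      have hstep : (if c = 'I' ∨ c = 'F' then a
          else if c = 'C' then a + 2 ^ k else a) = a + pvBit c * 2 ^ k := by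
        unfold pvBit
        split_ifs <;> simp_all
      have hh : pvHorner (c :: l) = 2 * pvHorner l + pvBit c := by
        simp [pvHorner]
      simp only [List.zipIdx_cons, List.foldl_cons]
      rw [ih (k + 1), hstep, hh]
      ring

theorem pvB_horner (l : List Char) :
    l.reverse.foldl (fun n c => n * 2 + (if c = 'C' then 1 else 0)) 0 = pvHorner l := by
  rw [List.foldl_reverse]
  induction l with
  | nil => rfl
  | cons c l ih =>
      simp only [List.foldr_cons, pvHorner] at *
      rw [ih]; unfold pvBit; ring

-- ===== VERDICT (by name: the statement is the Claim_ definition above) =====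
theorem parse_nat_spec : Claim_equal_parse_nat := by
  intro s _
  unfold Spec_parse_nat parse_nat parse_nat_alt
  rw [pvA_foldl, pvB_horner]
  simp
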